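-- pv_equiv track=rewrite | github.com/ChahelPaatur/Self-Modifying-Program-Synthesis-via-Online-Library-Evolution | common/object_ops.py | scale_object
-- ===== SOURCE A (Python) =====
-- from typing import List, Dict, Tuple, Set, Optional
--
-- Grid = List[List[int]]
--
-- def extract_object(grid: Grid, component: Set[Tuple[int, int]], bg_color: int = 0) -> Grid:
--     """Extract object as minimal bounding box grid"""
--     if not component:
--         return [[bg_color]]
--
--     rows = [r for r, c in component]
--     cols = [c for r, c in component]
--
--     min_r, max_r = min(rows), max(rows)
--     min_c, max_c = min(cols), max(cols)
--
--     h = max_r - min_r + 1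
--     w = max_c - min_c + 1
--
--     result = [[bg_color] * w for _ in range(h)]
--     for r, c in component:
--         result[r - min_r][c - min_c] = grid[r][c]
--
--     return result
--
-- def scale_object(grid: Grid, component: Set[Tuple[int, int]], scale: int, bg_color: int = 0) -> Grid:
--     """Scale object by integer factor"""
--     if scale <= 0:
--         return grid
--
--     # Extract object
--     obj = extract_object(grid, component, bg_color)
--
--     # Scale it
--     h, w = len(obj), len(obj[0])
--     scaled = []
--     for r in range(h):
--         for _ in range(scale):
--             row = []
--             for c in range(w):
--                 row.extend([obj[r][c]] * scale)
--             scaled.append(row)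
--
--     return scaled
-- ===== SOURCE B (Python) =====
-- def scale_object(grid, component, scale, bg_color=0):
--     """Scale object by integer factor (direct index-mapped construction)."""
--     if scale <= 0:
--         return grid
--     if not component:
--         return [[bg_color] * scale for _ in range(scale)]
--     min_r = min(r for r, _ in component)
--     max_r = max(r for r, _ in component)
--     min_c = min(c for _, c in component)
--     max_c = max(c for _, c in component)
--     h = max_r - min_r + 1
--     w = max_c - min_c + 1
--
--     def cell(i, j):
--         r, c = min_r + i, min_c + j
--         return grid[r][c] if (r, c) in component else bg_color
--
--     return [[cell(R // scale, C // scale) for C in range(w * scale)]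
--             for R in range(h * scale)]
-- ===== Notes on version B (the rewrite author's own statement) =====
-- stated objective: alternative
-- what changed: B builds the scaled output directly by index mapping (output cell (R,C) reads component cell (min_r+R//scale, min_c+C//scale) or bg_color) instead of A's extract-bounding-box-grid-then-repeat-rows-and-cells two-phase pipeline.
import Mathlib
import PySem

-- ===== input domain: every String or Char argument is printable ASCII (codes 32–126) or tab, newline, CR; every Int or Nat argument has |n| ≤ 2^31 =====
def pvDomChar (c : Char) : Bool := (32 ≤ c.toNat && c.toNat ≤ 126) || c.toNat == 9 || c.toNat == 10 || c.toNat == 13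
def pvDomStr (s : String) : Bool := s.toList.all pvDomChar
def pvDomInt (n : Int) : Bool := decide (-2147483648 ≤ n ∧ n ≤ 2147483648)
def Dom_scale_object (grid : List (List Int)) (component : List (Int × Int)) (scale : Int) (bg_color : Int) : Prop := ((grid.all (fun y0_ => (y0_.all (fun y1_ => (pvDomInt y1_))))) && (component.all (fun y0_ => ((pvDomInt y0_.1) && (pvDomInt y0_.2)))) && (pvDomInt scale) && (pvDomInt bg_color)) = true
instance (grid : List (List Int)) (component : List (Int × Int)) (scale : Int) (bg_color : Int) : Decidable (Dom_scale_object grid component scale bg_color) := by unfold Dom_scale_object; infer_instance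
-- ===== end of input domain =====

-- ===== PORT A =====
-- B changes the decomposition: direct index-mapped construction instead of extract-then-rescale (alternative; not claimed faster).

-- helper of A: extract_object (literal transliteration)
def extract_object (grid : List (List Int)) (component : List (Int × Int)) (bg_color : Int) : List (List Int) :=
  if component = [] then [[bg_color]]
  else
    let rows := component.map (fun p => p.1)
    let cols := component.map (fun p => p.2)
    let min_r := (PySem.List.min? rows (fun x => x)).getD 0
    let max_r := (PySem.List.max? rows (fun x => x)).getD 0
    let min_c := (PySem.List.min? cols (fun x => x)).getD 0
    let max_c := (PySem.List.max? cols (fun x => x)).getD 0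
    let h := max_r - min_r + 1
    let w := max_c - min_c + 1
    let result := (PySem.List.pyRange 0 h 1).map (fun _ => PySem.List.pyRepeat [bg_color] w)
    -- result[r - min_r][c - min_c] = grid[r][c]; the write indices are always in range,
    -- grid[r][c] may raise (excluded by Pre_), so pyGetD/pySetD are exact here
    component.foldl (fun res p =>
      PySem.List.pySetD res (p.1 - min_r)
        (PySem.List.pySetD (PySem.List.pyGetD res (p.1 - min_r) []) (p.2 - min_c)
          (PySem.List.pyGetD (PySem.List.pyGetD grid p.1 []) p.2 0))) result

def scale_object (grid : List (List Int)) (component : List (Int × Int)) (scale : Int) (bg_color : Int) : List (List Int) :=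
  if scale ≤ 0 then grid
  else
    let obj := extract_object grid component bg_color
    let h := PySem.List.len obj
    let w := PySem.List.len (PySem.List.pyGetD obj 0 [])
    (PySem.List.pyRange 0 h 1).foldl (fun scaled r =>
      (PySem.List.pyRange 0 scale 1).foldl (fun scaled _ =>
        scaled ++ [(PySem.List.pyRange 0 w 1).foldl (fun row c =>
          row ++ PySem.List.pyRepeat [PySem.List.pyGetD (PySem.List.pyGetD obj r []) c 0] scale) []]) scaled) []

-- ===== PORT B =====
def scale_object_alt (grid : List (List Int)) (component : List (Int × Int)) (scale : Int) (bg_color : Int) : List (List Int) :=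
  if scale ≤ 0 then grid
  else if component = [] then
    (PySem.List.pyRange 0 scale 1).map (fun _ => PySem.List.pyRepeat [bg_color] scale)
  else
    let min_r := (PySem.List.min? (component.map (fun p => p.1)) (fun x => x)).getD 0
    let max_r := (PySem.List.max? (component.map (fun p => p.1)) (fun x => x)).getD 0
    let min_c := (PySem.List.min? (component.map (fun p => p.2)) (fun x => x)).getD 0
    let max_c := (PySem.List.max? (component.map (fun p => p.2)) (fun x => x)).getD 0
    let h := max_r - min_r + 1
    let w := max_c - min_c + 1
    let cell := fun (i j : Int) =>
      if (min_r + i, min_c + j) ∈ component then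
        PySem.List.pyGetD (PySem.List.pyGetD grid (min_r + i) []) (min_c + j) 0
      else bg_color
    (PySem.List.pyRange 0 (h * scale) 1).map (fun R =>
      (PySem.List.pyRange 0 (w * scale) 1).map (fun C =>
        cell (PySem.Int.floordiv R scale) (PySem.Int.floordiv C scale)))

-- ===== PRECONDITION & SPEC =====
-- Pre_ excludes exactly the inputs where Python A raises IndexError: scale > 0 and some
-- component cell (r, c) with grid[r][c] out of range (B raises there too).
def Pre_scale_object (grid : List (List Int)) (component : List (Int × Int)) (scale : Int) (bg_color : Int) : Prop :=
  scale ≤ 0 ∨ ∀ p ∈ component, (((PySem.List.pyGet? grid p.1).bind (fun row => PySem.List.pyGet? row p.2)).isSome = true)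
instance (grid : List (List Int)) (component : List (Int × Int)) (scale : Int) (bg_color : Int) : Decidable (Pre_scale_object grid component scale bg_color) := by unfold Pre_scale_object; infer_instance

def pvWitness_scale_object : List (List Int) × (List (Int × Int)) × Int × Int :=
  ([[1, 2], [3, 4]], [(0, 0), (1, 1)], 2, 0)

def Spec_scale_object (grid : List (List Int)) (component : List (Int × Int)) (scale : Int) (bg_color : Int) (out : List (List Int)) : Prop := out = scale_object_alt grid component scale bg_color
instance (grid : List (List Int)) (component : List (Int × Int)) (scale : Int) (bg_color : Int) (out : List (List Int)) : Decidable (Spec_scale_object grid component scale bg_color out) := by unfold Spec_scale_object; infer_instance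

-- ===== CLAIM (what is proved, stated in full; the proofs are below) =====
def Claim_equal_scale_object : Prop := ∀ (grid : List (List Int)) (component : List (Int × Int)) (scale : Int) (bg_color : Int), Dom_scale_object grid component scale bg_color → Pre_scale_object grid component scale bg_color → Spec_scale_object grid component scale bg_color (scale_object grid component scale bg_color)

-- ===== LEMMAS AND PROOFS =====

def objStep (grid : List (List Int)) (mr mc : Int) (res : List (List Int)) (p : Int × Int) : List (List Int) :=
  PySem.List.pySetD res (p.1 - mr)
    (PySem.List.pySetD (PySem.List.pyGetD res (p.1 - mr) []) (p.2 - mc)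
      (PySem.List.pyGetD (PySem.List.pyGetD grid p.1 []) p.2 0))

lemma map_block_div {b : Type} (s n : Int) (hs : 0 < s) (f : Int → b) :
    (PySem.List.pyRange (n*s) (n*s+s) 1).map (fun R => f (PySem.Int.floordiv R s)) =
    List.replicate s.toNat (f n) := by
  rw [PySem.List.pyRange_one]
  have hb : (n*s + s - n*s).toNat = s.toNat := by omega
  rw [hb, List.map_map]
  have hpt : ∀ k ∈ List.range s.toNat,
      ((fun R => f (PySem.Int.floordiv R s)) ∘ fun (k : Nat) => n*s + (k:Int)) k = f n := by
    intro k hk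
    simp only [Function.comp_apply]
    congr 1
    rw [PySem.Int.floordiv_eq_iff_of_pos hs]
    have hk' : (k:Int) < s := by
      have := List.mem_range.mp hk; omega
    constructor
    · omega
    · have : (n+1)*s = n*s + s := by ring
      omega
  rw [List.map_congr_left hpt]
  simp
lemma map_range_div {b : Type} (s : Int) (hs : 0 < s) (f : Int → b) :
    ∀ (n : Int), 0 ≤ n →
    (PySem.List.pyRange 0 (n*s) 1).map (fun R => f (PySem.Int.floordiv R s)) =
    (PySem.List.pyRange 0 n 1).flatMap (fun r => List.replicate s.toNat (f r)) := by
  intro n hn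
  induction n, hn using Int.le_induction with
  | base =>
    rw [zero_mul]; simp [PySem.List.pyRange_one_eq_nil le_rfl]
  | succ n hn ih =>
    have h1 : (n+1)*s = n*s + s := by ring
    rw [h1, PySem.List.pyRange_one_append 0 (n*s) (n*s+s) (by positivity) (by omega),
        List.map_append, ih, map_block_div s n hs f,
        PySem.List.pyRange_one_succ_right hn, List.flatMap_append]
    simp
lemma getD_set_getElem {a : Type} [Inhabited a] (xs : List a) (m : Nat) (r : a) (i : Nat)
    (hi : i < xs.length) (d : a) :
    ((xs.set m r).getD i d) = if m = i then r else xs[i] := by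
  rw [List.getD_eq_getElem _ _ (by simpa using hi), List.getElem_set]

lemma fold_cells (grid : List (List Int)) (mr mc : Int) (H W : Nat) :
    ∀ (l : List (Int × Int)) (res : List (List Int)),
    res.length = H →
    (∀ k (hk : k < res.length), res[k].length = W) →
    (∀ p ∈ l, 0 ≤ p.1 - mr ∧ p.1 - mr < (H:Int) ∧ 0 ≤ p.2 - mc ∧ p.2 - mc < (W:Int)) →
    (l.foldl (objStep grid mr mc) res).length = H ∧
    (∀ k (hk : k < (l.foldl (objStep grid mr mc) res).length),
        (l.foldl (objStep grid mr mc) res)[k].length = W) ∧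
    (∀ (i j : Nat), i < H → j < W →
      ((l.foldl (objStep grid mr mc) res).getD i []).getD j 0 =
        if (mr + (i:Int), mc + (j:Int)) ∈ l
        then PySem.List.pyGetD (PySem.List.pyGetD grid (mr + (i:Int)) []) (mc + (j:Int)) 0
        else (res.getD i []).getD j 0) := by
  intro l
  induction l with
  | nil =>
    intro res h1 h2 _
    refine ⟨h1, h2, ?_⟩
    intro i j hi hj
    simp
  | cons p l ih =>
    intro res h1 h2 h3
    obtain ⟨hp1, hp2, hp3, hp4⟩ := h3 p (List.mem_cons_self)
    have hi0 : (p.1 - mr).toNat < H := by omega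
    have hj0 : (p.2 - mc).toNat < W := by omega
    have hi0' : (p.1 - mr).toNat < res.length := by omega
    have hrow : PySem.List.pyGetD res (p.1 - mr) [] = res[(p.1 - mr).toNat] := by
      rw [PySem.List.pyGetD_eq_getElem res [] hp1 (by omega)]
    set v := PySem.List.pyGetD (PySem.List.pyGetD grid p.1 []) p.2 0 with hv
    have hstep : objStep grid mr mc res p =
        res.set (p.1 - mr).toNat (res[(p.1 - mr).toNat].set (p.2 - mc).toNat v) := by
      rw [objStep, hrow, PySem.List.pySetD_of_nonneg _ _ hp3, PySem.List.pySetD_of_nonneg _ _ hp1]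
    have hlen' : (objStep grid mr mc res p).length = H := by
      rw [hstep, List.length_set, h1]
    have hrows' : ∀ k (hk : k < (objStep grid mr mc res p).length),
        (objStep grid mr mc res p)[k].length = W := by
      intro k hk
      simp only [hstep, List.getElem_set]
      split
      · rw [List.length_set]; exact h2 _ hi0'
      · exact h2 _ (by simp only [hstep, List.length_set] at hk; omega)
    have hbounds' : ∀ q ∈ l, 0 ≤ q.1 - mr ∧ q.1 - mr < (H:Int) ∧ 0 ≤ q.2 - mc ∧ q.2 - mc < (W:Int) :=
      fun q hq => h3 q (List.mem_cons_of_mem _ hq)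
    obtain ⟨c1, c2, c3⟩ := ih (objStep grid mr mc res p) hlen' hrows' hbounds'
    rw [List.foldl_cons]
    refine ⟨c1, c2, ?_⟩
    intro i j hi hj
    rw [c3 i j hi hj]
    have hiR : i < res.length := by omega
    have hres_i : res.getD i ([] : List Int) = res[i] := List.getD_eq_getElem _ _ hiR
    by_cases hmem : (mr + (i:Int), mc + (j:Int)) ∈ l
    · simp [hmem]
    · simp only [hmem, if_false, List.mem_cons, or_false]
      rw [hstep, hres_i, getD_set_getElem _ _ _ _ hiR]
      by_cases hieq : (p.1 - mr).toNat = i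
      · subst hieq
        rw [if_pos rfl]
        have hlenrow : (res[(p.1 - mr).toNat].set (p.2 - mc).toNat v).length = W := by
          rw [List.length_set, h2 _ hi0']
        by_cases heq : (mr + ((p.1 - mr).toNat : Int), mc + (j:Int)) = p
        · rw [if_pos heq]
          have e1 : p.1 = mr + ((p.1 - mr).toNat : Int) := by omega
          have e2 : p.2 = mc + (j:Int) := by rw [← heq]
          have hj' : (p.2 - mc).toNat = j := by omega
          rw [List.getD_eq_getElem _ _ (by rw [hlenrow]; omega), List.getElem_set, if_pos hj',
              hv, ← e1, ← e2]
        · rw [if_neg heq]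
          have hjne : (p.2 - mc).toNat ≠ j := by
            intro hj2
            exact heq (Prod.ext (by omega) (by omega)).symm
          rw [List.getD_eq_getElem _ _ (by rw [hlenrow]; omega), List.getElem_set, if_neg hjne,
              List.getD_eq_getElem _ _ (by rw [h2 _ hiR]; omega)]
      · rw [if_neg hieq]
        have heq : ¬((mr + (i:Int), mc + (j:Int)) = p) := by
          intro h
          apply hieq
          have : p.1 = mr + (i:Int) := by rw [← h]
          omega
        rw [if_neg heq]

lemma flatMap_const_singleton {a : Type} (l : List Int) (x : a) :
    l.flatMap (fun _ => [x]) = List.replicate l.length x := by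
  induction l with
  | nil => simp
  | cons q t ih => simp [ih, List.replicate_succ]

theorem main_eq (grid : List (List Int)) (component : List (Int × Int)) (scale : Int) (bg_color : Int) :
    scale_object grid component scale bg_color = scale_object_alt grid component scale bg_color := by
  by_cases hs : scale ≤ 0
  · simp [scale_object, scale_object_alt, hs]
  have hs' : 0 < scale := by omega
  by_cases hcomp : component = []
  · subst hcomp
    simp only [scale_object, scale_object_alt, extract_object, if_neg hs]
    norm_num
    rw [show PySem.List.pyRange 0 1 = [0] by rw [PySem.List.pyRange_one]; norm_num]
    simp [PySem.List.pyGetD_zero_cons]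
  · obtain ⟨mr, hmr⟩ : ∃ m, PySem.List.min? (component.map (fun p => p.1)) (fun x => x) = some m := by
      cases hm : PySem.List.min? (component.map (fun p => p.1)) (fun x => x) with
      | none => exact absurd (List.map_eq_nil_iff.mp (Iff.mp (PySem.List.min?_eq_none_iff _ _) hm)) hcomp
      | some m => exact ⟨m, rfl⟩
    obtain ⟨Mr, hMr⟩ : ∃ m, PySem.List.max? (component.map (fun p => p.1)) (fun x => x) = some m := by
      cases hm : PySem.List.max? (component.map (fun p => p.1)) (fun x => x) with
      | none => exact absurd (List.map_eq_nil_iff.mp (Iff.mp (PySem.List.max?_eq_none_iff _ _) hm)) hcomp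
      | some m => exact ⟨m, rfl⟩
    obtain ⟨mc, hmc⟩ : ∃ m, PySem.List.min? (component.map (fun p => p.2)) (fun x => x) = some m := by
      cases hm : PySem.List.min? (component.map (fun p => p.2)) (fun x => x) with
      | none => exact absurd (List.map_eq_nil_iff.mp (Iff.mp (PySem.List.min?_eq_none_iff _ _) hm)) hcomp
      | some m => exact ⟨m, rfl⟩
    obtain ⟨Mc, hMc⟩ : ∃ m, PySem.List.max? (component.map (fun p => p.2)) (fun x => x) = some m := by
      cases hm : PySem.List.max? (component.map (fun p => p.2)) (fun x => x) with
      | none => exact absurd (List.map_eq_nil_iff.mp (Iff.mp (PySem.List.max?_eq_none_iff _ _) hm)) hcomp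
      | some m => exact ⟨m, rfl⟩
    have hbnd : ∀ p ∈ component, mr ≤ p.1 ∧ p.1 ≤ Mr ∧ mc ≤ p.2 ∧ p.2 ≤ Mc := by
      intro p hp
      exact ⟨PySem.List.min?_isMin hmr _ (List.mem_map_of_mem hp),
             PySem.List.max?_isMax hMr _ (List.mem_map_of_mem hp),
             PySem.List.min?_isMin hmc _ (List.mem_map_of_mem hp),
             PySem.List.max?_isMax hMc _ (List.mem_map_of_mem hp)⟩
    obtain ⟨q, rest, rfl⟩ := List.exists_cons_of_ne_nil hcomp
    have hh : 0 < Mr - mr + 1 := by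
      obtain ⟨a1, a2, _, _⟩ := hbnd q List.mem_cons_self; omega
    have hw : 0 < Mc - mc + 1 := by
      obtain ⟨_, _, a3, a4⟩ := hbnd q List.mem_cons_self; omega
    simp only [scale_object, scale_object_alt, extract_object, if_neg hs,
               if_neg (by simp : ¬(q :: rest = [])), hmr, hMr, hmc, hMc, Option.getD_some]
    set h := Mr - mr + 1 with hhdef
    set w := Mc - mc + 1 with hwdef
    set res0 := List.map (fun _ => PySem.List.pyRepeat [bg_color] w) (PySem.List.pyRange 0 h) with hres0
    have hfoldeq : (List.foldl (fun res p =>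
        PySem.List.pySetD res (p.1 - mr)
          (PySem.List.pySetD (PySem.List.pyGetD res (p.1 - mr) []) (p.2 - mc)
            (PySem.List.pyGetD (PySem.List.pyGetD grid p.1 []) p.2 0))) res0 (q :: rest))
        = List.foldl (objStep grid mr mc) res0 (q :: rest) := rfl
    rw [hfoldeq]
    set obj := List.foldl (objStep grid mr mc) res0 (q :: rest) with hobj
    have hres0len : res0.length = h.toNat := by
      rw [hres0, List.length_map, PySem.List.length_pyRange_one]
      norm_num
    have hres0rows : ∀ k (hk : k < res0.length), res0[k].length = w.toNat := by
      intro k hk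
      simp [hres0, PySem.List.pyRepeat_singleton]
    have hres0cell : ∀ (i j : Nat), i < h.toNat → j < w.toNat → (res0.getD i []).getD j 0 = bg_color := by
      intro i j hi hj
      have hr : res0.getD i [] = List.replicate w.toNat bg_color := by
        rw [List.getD_eq_getElem _ _ (by omega)]
        simp [hres0, PySem.List.pyRepeat_singleton]
      rw [hr, List.getD_eq_getElem _ _ (by simpa using hj), List.getElem_replicate]
    have hbounds : ∀ p ∈ q :: rest, 0 ≤ p.1 - mr ∧ p.1 - mr < ((h.toNat : Nat) : Int) ∧ 0 ≤ p.2 - mc ∧ p.2 - mc < ((w.toNat : Nat) : Int) := by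
      intro p hp
      obtain ⟨a1, a2, a3, a4⟩ := hbnd p hp
      refine ⟨by omega, by omega, by omega, by omega⟩
    obtain ⟨o1', o2', o3'⟩ := fold_cells grid mr mc h.toNat w.toNat (q :: rest) res0 hres0len hres0rows hbounds
    have o1 : obj.length = h.toNat := o1'
    have o2 : ∀ k (hk : k < obj.length), obj[k].length = w.toNat := o2'
    have o3 : ∀ (i j : Nat), i < h.toNat → j < w.toNat →
        (obj.getD i []).getD j 0 =
          if (mr + (i:Int), mc + (j:Int)) ∈ q :: rest then
            PySem.List.pyGetD (PySem.List.pyGetD grid (mr + (i:Int)) []) (mc + (j:Int)) 0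
          else (res0.getD i []).getD j 0 := o3'
    clear o1' o2' o3'
    have hlenobj : PySem.List.len obj = h := by
      rw [PySem.List.len_eq, o1]; omega
    have hobjpos : 0 < obj.length := by omega
    have hget0 : PySem.List.pyGetD obj (0 : Int) [] = obj[0] := by
      rw [PySem.List.pyGetD_eq_getElem obj [] le_rfl (by exact_mod_cast hobjpos)]
      rfl
    have hwobj : PySem.List.len (PySem.List.pyGetD obj (0 : Int) []) = w := by
      rw [hget0, PySem.List.len_eq, o2 0 hobjpos]; omega
    rw [hlenobj, hwobj]
    -- cell agreement
    have hcell : ∀ (r c : Int), 0 ≤ r → r < h → 0 ≤ c → c < w →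
        PySem.List.pyGetD (PySem.List.pyGetD obj r []) c 0 =
        (if (mr + r, mc + c) ∈ q :: rest then
          PySem.List.pyGetD (PySem.List.pyGetD grid (mr + r) []) (mc + c) 0
        else bg_color) := by
      intro r c hr0 hrh hc0 hcw
      have hrN : r.toNat < h.toNat := by omega
      have hcN : c.toNat < w.toNat := by omega
      have h1 : PySem.List.pyGetD obj r [] = obj.getD r.toNat [] := by
        rw [PySem.List.pyGetD_eq_getElem obj [] hr0 (by omega), List.getD_eq_getElem _ _ (by omega)]
      have h2 : PySem.List.pyGetD (obj.getD r.toNat []) c 0 = (obj.getD r.toNat []).getD c.toNat 0 := by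
        have hlenr : (obj.getD r.toNat []).length = w.toNat := by
          rw [List.getD_eq_getElem _ _ (by omega)]
          exact o2 _ (by omega)
        rw [PySem.List.pyGetD_eq_getElem _ 0 hc0 (by rw [hlenr]; omega)]
        exact (List.getD_eq_getElem _ _ (by rw [hlenr]; omega)).symm
      rw [h1, h2, o3 r.toNat c.toNat hrN hcN, hres0cell r.toNat c.toNat hrN hcN]
      have er : (r.toNat : Int) = r := by omega
      have ec : (c.toNat : Int) = c := by omega
      rw [er, ec]
    -- flatten A's folds
    simp only [PySem.List.foldl_append_eq_flatMap, List.nil_append]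
    simp only [flatMap_const_singleton, PySem.List.length_pyRange_one]
    rw [show (scale - 0).toNat = scale.toNat by norm_num,
        map_range_div scale hs' (fun r => List.map (fun C =>
          if (mr + r, mc + PySem.Int.floordiv C scale) ∈ q :: rest then
            PySem.List.pyGetD (PySem.List.pyGetD grid (mr + r) []) (mc + PySem.Int.floordiv C scale) 0
          else bg_color) (PySem.List.pyRange 0 (w * scale))) h hh.le]
    apply List.flatMap_congr
    intro r hr
    obtain ⟨hr0, hrh⟩ := PySem.List.mem_pyRange_one.mp hr
    congr 1
    rw [map_range_div scale hs' (fun c =>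
          if (mr + r, mc + c) ∈ q :: rest then
            PySem.List.pyGetD (PySem.List.pyGetD grid (mr + r) []) (mc + c) 0
          else bg_color) w hw.le]
    apply List.flatMap_congr
    intro c hc
    obtain ⟨hc0, hcw⟩ := PySem.List.mem_pyRange_one.mp hc
    rw [PySem.List.pyRepeat_singleton, hcell r c hr0 hrh hc0 hcw]

-- ===== VERDICT (by name: the statement is the Claim_ definition above) =====
theorem scale_object_spec : Claim_equal_scale_object := by
  intro grid component scale bg_color _ _
  exact main_eq grid component scale bg_color
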